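-- pv_equiv track=rewrite | github.com/t1ooo/geeksforgeeks | count-number-of-bits-to-be-flipped-to-convert-a-to-b/main.py | countBitsFlipV4
-- ===== SOURCE A (Python) =====
-- def countBitsFlipV4(a, b):
--     def countSetBits(n):
--         count = 0
--         while n > 0:
--             count += 1
--             n &= n - 1
--         return count
--
--     xor = a ^ b
--     return countSetBits(xor)
-- ===== SOURCE B (Python) =====
-- def countBitsFlipV4(a, b):
--     def countSetBits(n):
--         count = 0
--         while n > 0:
--             count += n & 1
--             n >>= 1
--         return count
--
--     xor = a ^ b
--     return countSetBits(xor)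
-- ===== Notes on version B (the rewrite author's own statement) =====
-- stated objective: alternative
-- what changed: The Kernighan clear-lowest-set-bit loop (one iteration per set bit) is replaced by a shift-based popcount that adds the low bit and right-shifts once per bit position of the XOR.
import Mathlib
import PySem

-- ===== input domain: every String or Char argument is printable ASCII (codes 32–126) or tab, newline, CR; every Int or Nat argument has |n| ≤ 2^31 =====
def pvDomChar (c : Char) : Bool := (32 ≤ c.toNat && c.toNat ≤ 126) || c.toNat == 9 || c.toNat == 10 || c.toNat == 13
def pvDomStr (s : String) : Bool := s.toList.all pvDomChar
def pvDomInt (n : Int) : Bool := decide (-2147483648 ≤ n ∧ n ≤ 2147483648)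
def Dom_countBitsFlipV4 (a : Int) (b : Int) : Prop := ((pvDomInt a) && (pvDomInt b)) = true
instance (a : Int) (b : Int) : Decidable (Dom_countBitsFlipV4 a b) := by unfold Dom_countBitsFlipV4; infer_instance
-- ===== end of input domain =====

-- B replaces the Kernighan clear-lowest-set-bit loop (one iteration per set bit of a^b)
-- by a shift-based popcount loop (one iteration per bit position of a^b); same return value.


-- ===== PORT A =====
-- inner helper countSetBits: count = 0; while n > 0: count += 1; n &= n - 1
def pvCountSetBitsKern (count : Int) (n : Int) : Int :=
  if h : 0 < n then pvCountSetBitsKern (count + 1) (PySem.Int.band n (n - 1))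
  else count
termination_by n.toNat
decreasing_by
  rw [PySem.Int.band_of_nonneg (by omega) (by omega)]
  have h1 : n.toNat &&& (n - 1).toNat ≤ (n - 1).toNat := Nat.and_le_right
  simp only [Int.toNat_natCast]
  omega

def countBitsFlipV4 (a : Int) (b : Int) : Int :=
  let xor := PySem.Int.bxor a b
  pvCountSetBitsKern 0 xor

-- ===== PORT B =====
-- inner helper countSetBits: count = 0; while n > 0: count += n & 1; n >>= 1
def pvCountSetBitsShift (count : Int) (n : Int) : Int :=
  if _h : 0 < n then pvCountSetBitsShift (count + PySem.Int.band n 1) (n >>> (1 : Nat))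
  else count
termination_by n.toNat
decreasing_by
  have hn : n = (n.toNat : Int) := by omega
  rw [hn, ← Int.natCast_shiftRight]
  simp only [Int.toNat_natCast, Nat.shiftRight_one]
  omega

def countBitsFlipV4_alt (a : Int) (b : Int) : Int :=
  let xor := PySem.Int.bxor a b
  pvCountSetBitsShift 0 xor

-- ===== PRECONDITION & SPEC =====
def Spec_countBitsFlipV4 (a : Int) (b : Int) (out : Int) : Prop := out = countBitsFlipV4_alt a b
instance (a : Int) (b : Int) (out : Int) : Decidable (Spec_countBitsFlipV4 a b out) := by unfold Spec_countBitsFlipV4; infer_instance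

-- ===== CLAIM (what is proved, stated in full; the proofs are below) =====
def Claim_equal_countBitsFlipV4 : Prop := ∀ (a : Int) (b : Int), Dom_countBitsFlipV4 a b → Spec_countBitsFlipV4 a b (countBitsFlipV4 a b)

-- ===== LEMMAS AND PROOFS =====

-- ghost popcount on Nat used only by the proofs
def pvPopc (m : Nat) : Nat :=
  if m = 0 then 0 else m % 2 + pvPopc (m / 2)
termination_by m
decreasing_by omega

theorem pvPopc_two_mul (k : Nat) : pvPopc (2 * k) = pvPopc k := by
  rcases Nat.eq_zero_or_pos k with hk | hk
  · simp [hk]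
  · rw [pvPopc, if_neg (by omega : ¬ 2 * k = 0),
      (by omega : 2 * k % 2 = 0), (by omega : 2 * k / 2 = k)]
    omega

theorem pvPopc_two_mul_add_one (k : Nat) : pvPopc (2 * k + 1) = pvPopc k + 1 := by
  rw [pvPopc]
  simp [(by omega : (2 * k + 1) % 2 = 1), (by omega : (2 * k + 1) / 2 = k)]
  omega

theorem pv_and_odd (k : Nat) : (2 * k + 1) &&& (2 * k) = 2 * k := by
  apply Nat.eq_of_testBit_eq
  intro i
  cases i with
  | zero =>
      simp [Nat.testBit_and, Nat.testBit_zero, Nat.mul_mod_right,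
        (by omega : (2 * k + 1) % 2 = 1), (by omega : (2 * k) % 2 = 0)]
  | succ j =>
      rw [Nat.testBit_and]
      simp [Nat.testBit_succ, (by omega : (2 * k + 1) / 2 = k), (by omega : (2 * k) / 2 = k)]

theorem pv_and_even (k : Nat) (hk : 0 < k) :
    (2 * k) &&& (2 * k - 1) = 2 * (k &&& (k - 1)) := by
  apply Nat.eq_of_testBit_eq
  intro i
  cases i with
  | zero =>
      simp [Nat.testBit_and, Nat.testBit_zero,
        (by omega : (2 * k) % 2 = 0), (by omega : (2 * (k &&& (k - 1))) % 2 = 0)]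
  | succ j =>
      rw [Nat.testBit_and]
      simp only [Nat.testBit_succ, (by omega : (2 * k) / 2 = k),
        (by omega : (2 * k - 1) / 2 = k - 1),
        (by omega : (2 * (k &&& (k - 1))) / 2 = k &&& (k - 1))]
      rw [Nat.testBit_and]

-- clearing the lowest set bit removes exactly one bit from the popcount
theorem pvPopc_and_pred (m : Nat) (hm : 0 < m) :
    pvPopc m = pvPopc (m &&& (m - 1)) + 1 := by
  induction m using Nat.strong_induction_on with
  | _ m ih =>
    rcases Nat.even_or_odd m with ⟨k, hk⟩ | ⟨k, hk⟩
    · -- m = 2 * k, k > 0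
      have hk' : 0 < k := by omega
      have hsub : m = 2 * k := by omega
      subst hsub
      rw [pv_and_even k hk', pvPopc_two_mul, pvPopc_two_mul,
        ih k (by omega) hk']
    · -- m = 2 * k + 1
      subst hk
      have : (2 * k + 1) - 1 = 2 * k := by omega
      rw [this, pv_and_odd, pvPopc_two_mul, pvPopc_two_mul_add_one]

theorem pvKern_eq (m : Nat) : ∀ c : Int, pvCountSetBitsKern c (m : Int) = c + (pvPopc m : Int) := by
  induction m using Nat.strong_induction_on with
  | _ m ih =>
    intro c
    rcases Nat.eq_zero_or_pos m with hm | hm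
    · subst hm
      rw [pvCountSetBitsKern, pvPopc]
      simp
    · rw [pvCountSetBitsKern]
      have hlt : (0 : Int) < (m : Int) := by exact_mod_cast hm
      rw [dif_pos hlt]
      have hc : ((m : Int) - 1) = ((m - 1 : Nat) : Int) := by omega
      rw [hc, PySem.Int.band_natCast]
      have hsmall : m &&& (m - 1) < m :=
        Nat.lt_of_le_of_lt Nat.and_le_right (by omega)
      rw [ih _ hsmall, pvPopc_and_pred m hm]
      push_cast
      ring

theorem pvShift_eq (m : Nat) : ∀ c : Int, pvCountSetBitsShift c (m : Int) = c + (pvPopc m : Int) := by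
  induction m using Nat.strong_induction_on with
  | _ m ih =>
    intro c
    rcases Nat.eq_zero_or_pos m with hm | hm
    · subst hm
      rw [pvCountSetBitsShift, pvPopc]
      simp
    · rw [pvCountSetBitsShift]
      have hlt : (0 : Int) < (m : Int) := by exact_mod_cast hm
      rw [dif_pos hlt]
      rw [(by norm_num : (1 : Int) = ((1 : Nat) : Int)), PySem.Int.band_natCast,
        ← Int.natCast_shiftRight]
      rw [ih (m >>> 1) (by simp [Nat.shiftRight_one]; omega)]
      conv_rhs => rw [pvPopc, if_neg (by omega : ¬ m = 0)]
      simp only [Nat.shiftRight_one, Nat.and_one_is_mod]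
      push_cast
      ring

theorem pvLoops_eq (x : Int) : pvCountSetBitsKern 0 x = pvCountSetBitsShift 0 x := by
  by_cases hx : 0 < x
  · have hn : x = (x.toNat : Int) := by omega
    rw [hn, pvKern_eq, pvShift_eq]
  · rw [pvCountSetBitsKern, pvCountSetBitsShift, dif_neg hx, dif_neg hx]

-- ===== VERDICT (by name: the statement is the Claim_ definition above) =====
theorem countBitsFlipV4_spec : Claim_equal_countBitsFlipV4 := by
  intro a b _
  unfold Spec_countBitsFlipV4 countBitsFlipV4 countBitsFlipV4_alt
  exact pvLoops_eq _
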